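-- pv_equiv track=rewrite | github.com/ZoloAi/ZoloMedia | zlsp/zlsp/core/providers/provider_modules/diagnostic_formatter.py | _get_code_block_lines
-- ===== SOURCE A (Python) =====
-- from typing import List, Optional
--
-- def _get_code_block_lines(lines: List[str]) -> set:
--     """
--     Get line numbers that are inside markdown code blocks.
--
--     Code blocks are delimited by triple backticks (```).
--
--     Args:
--         lines: List of file lines
--
--     Returns:
--         Set of line numbers inside code blocks
--     """
--     code_block_lines = set()
--     in_code_block = False
--
--     for line_num, line in enumerate(lines):
--         stripped = line.strip()
--
--         # Check for code block delimiter
--         if stripped.startswith('```'):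
--             in_code_block = not in_code_block
--             # Include the delimiter line itself
--             code_block_lines.add(line_num)
--             continue
--
--         # If inside code block, mark this line
--         if in_code_block:
--             code_block_lines.add(line_num)
--
--     return code_block_lines
-- ===== SOURCE B (Python) =====
-- def _get_code_block_lines(lines):
--     """Two-phase: collect fence-delimiter indices, then fill each span."""
--     delims = [i for i, line in enumerate(lines) if line.strip().startswith('```')]
--     result = set()
--     while delims:
--         start = delims[0]
--         if len(delims) >= 2:
--             result.update(range(start, delims[1] + 1))
--             delims = delims[2:]
--         else:
--             result.update(range(start, len(lines)))
--             delims = []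
--     return result
-- ===== Notes on version B (the rewrite author's own statement) =====
-- stated objective: alternative
-- what changed: Replaces A's single-pass in/out-of-block toggle with a two-phase decomposition: first collect all fence-delimiter indices, then fill each delimiter pair's span (and the unclosed trailing fence's span to end of file) into the result set.
import Mathlib
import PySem

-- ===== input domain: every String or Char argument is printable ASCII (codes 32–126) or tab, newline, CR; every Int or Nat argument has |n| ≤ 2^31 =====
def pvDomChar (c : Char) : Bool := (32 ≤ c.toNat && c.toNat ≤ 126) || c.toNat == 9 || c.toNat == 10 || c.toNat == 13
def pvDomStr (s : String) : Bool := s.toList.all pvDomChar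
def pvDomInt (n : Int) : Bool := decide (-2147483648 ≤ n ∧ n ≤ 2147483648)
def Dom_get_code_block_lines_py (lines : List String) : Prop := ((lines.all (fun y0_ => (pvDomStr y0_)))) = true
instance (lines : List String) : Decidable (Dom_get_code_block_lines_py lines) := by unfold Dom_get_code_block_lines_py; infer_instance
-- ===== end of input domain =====

-- B replaces A's stateful in/out-of-block toggle by a two-phase decomposition
-- (collect fence indices, then fill each span); objective: alternative, same cost.

-- ===== PORT A =====
-- loop body of A's single pass (state = (code_block_lines, in_code_block))
def pvAStep (st : PySem.Set Int × Bool) (p : Int × String) : PySem.Set Int × Bool :=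
  let stripped := PySem.Str.strip p.2
  if PySem.Str.startswith stripped "```" then (PySem.Set.add st.1 p.1, !st.2)
  else if st.2 then (PySem.Set.add st.1 p.1, st.2)
  else st

def get_code_block_lines_py (lines : List String) : List Int :=
  ((PySem.List.enumerate lines 0).foldl pvAStep (PySem.Set.empty, false)).1

-- ===== PORT B =====
-- B's while-loop: consume the delimiter indices two at a time, filling each span
def pvFillSpans (n : Int) : List Int → PySem.Set Int → PySem.Set Int
  | [], result => result
  | d0 :: d1 :: rest, result =>
      pvFillSpans n rest (PySem.Set.update result (PySem.List.pyRange d0 (d1 + 1) 1))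
  | [d0], result => PySem.Set.update result (PySem.List.pyRange d0 n 1)

def get_code_block_lines_py_alt (lines : List String) : List Int :=
  let delims := ((PySem.List.enumerate lines 0).filter
      (fun p => PySem.Str.startswith (PySem.Str.strip p.2) "```")).map (·.1)
  pvFillSpans (PySem.List.len lines) delims PySem.Set.empty

-- ===== PRECONDITION & SPEC =====
def Spec_get_code_block_lines_py (lines : List String) (out : List Int) : Prop := out = get_code_block_lines_py_alt lines
instance (lines : List String) (out : List Int) : Decidable (Spec_get_code_block_lines_py lines out) := by unfold Spec_get_code_block_lines_py; infer_instance

-- ===== CLAIM (what is proved, stated in full; the proofs are below) =====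
def Claim_equal_get_code_block_lines_py : Prop := ∀ (lines : List String), Dom_get_code_block_lines_py lines → Spec_get_code_block_lines_py lines (get_code_block_lines_py lines)

-- ===== LEMMAS AND PROOFS =====

-- accumulating a span one element at a time = updating with the whole range
lemma update_snoc (acc : PySem.Set Int) (o s : Int) (h : o ≤ s) :
    PySem.Set.add (PySem.Set.update acc (PySem.List.pyRange o s 1)) s
      = PySem.Set.update acc (PySem.List.pyRange o (s + 1) 1) := by
  rw [PySem.List.pyRange_one_succ_right h]
  simp [PySem.Set.update, List.foldl_append]

-- the key invariant: A's single pass, from either toggle state, equals B's span filling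
lemma key (lines : List String) :
    (∀ (s : Int) (acc : PySem.Set Int),
      ((PySem.List.enumerate lines s).foldl pvAStep (acc, false)).1
        = pvFillSpans (s + lines.length)
            (((PySem.List.enumerate lines s).filter
                (fun p => PySem.Str.startswith (PySem.Str.strip p.2) "```")).map (·.1)) acc)
    ∧ (∀ (s : Int) (acc : PySem.Set Int) (o : Int), o ≤ s →
      ((PySem.List.enumerate lines s).foldl pvAStep
          (PySem.Set.update acc (PySem.List.pyRange o s 1), true)).1
        = pvFillSpans (s + lines.length)
            (o :: ((PySem.List.enumerate lines s).filter
                (fun p => PySem.Str.startswith (PySem.Str.strip p.2) "```")).map (·.1)) acc) := by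
  induction lines with
  | nil =>
      constructor
      · intro s acc
        simp [PySem.List.enumerate_nil, pvFillSpans]
      · intro s acc o _
        simp [PySem.List.enumerate_nil, pvFillSpans]
  | cons l ls ih =>
      obtain ⟨ihF, ihT⟩ := ih
      constructor
      · intro s acc
        rw [PySem.List.enumerate_cons]
        by_cases hp : PySem.Str.startswith (PySem.Str.strip l) "```"
        · have h1 : PySem.Set.add acc s
              = PySem.Set.update acc (PySem.List.pyRange s (s + 1) 1) := by
            simp [PySem.List.pyRange_one_singleton, PySem.Set.update]
          simp only [List.foldl_cons, pvAStep, hp, if_true, List.filter_cons, List.map_cons, Bool.not_false, Bool.not_true]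
          rw [h1, ihT (s + 1) acc s (by omega)]
          simp [pvFillSpans]
          ring_nf
        · simp only [List.foldl_cons, pvAStep, hp, List.filter_cons]
          rw [if_neg (by simpa using hp)]
          simp only [Bool.false_eq_true, if_false, hp]
          rw [ihF (s + 1) acc]
          simp only [List.length_cons]
          norm_num
          ring_nf
      · intro s acc o ho
        rw [PySem.List.enumerate_cons]
        by_cases hp : PySem.Str.startswith (PySem.Str.strip l) "```"
        · simp only [List.foldl_cons, pvAStep, hp, if_true, List.filter_cons, List.map_cons, Bool.not_false, Bool.not_true]
          rw [update_snoc acc o s ho, ihF (s + 1) (PySem.Set.update acc (PySem.List.pyRange o (s + 1) 1))]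
          simp [pvFillSpans]
          ring_nf
        · simp only [List.foldl_cons, pvAStep, List.filter_cons]
          rw [if_neg (by simpa using hp)]
          simp only [if_true, hp, Bool.not_true]
          rw [update_snoc acc o s ho, ihT (s + 1) acc o (by omega)]
          simp only [List.length_cons]
          norm_num
          ring_nf

-- ===== VERDICT (by name: the statement is the Claim_ definition above) =====
theorem get_code_block_lines_py_spec : Claim_equal_get_code_block_lines_py := by
  intro lines _
  unfold Spec_get_code_block_lines_py get_code_block_lines_py get_code_block_lines_py_alt
  rw [(key lines).1 0 PySem.Set.empty]
  simp [PySem.List.len]
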